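-- pv_equiv track=rewrite | github.com/joshuaowalker/exhaustive_barcode_generator | barcode_generator.py | has_homopolymer
-- ===== SOURCE A (Python) =====
-- from typing import List, Tuple, Optional, Iterator, Dict, Set
--
-- def has_homopolymer(barcode: List[str], max_homopolymer_length: int) -> bool:
--     """Check if barcode has homopolymer runs longer than specified length"""
--     count = 1
--     for i in range(1, len(barcode)):
--         if barcode[i] == barcode[i - 1]:
--             count += 1
--             if count > max_homopolymer_length:
--                 return True
--         else:
--             count = 1
--     return False
-- ===== SOURCE B (Python) =====
-- def has_homopolymer(barcode, max_homopolymer_length):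
--     """Check if barcode has homopolymer runs longer than specified length"""
--     # A run of a single character can never trigger, so the effective threshold is at least 1.
--     threshold = max(max_homopolymer_length, 1)
--     i, n = 0, len(barcode)
--     while i < n:
--         j = i + 1
--         while j < n and barcode[j] == barcode[i]:
--             j += 1
--         if j - i > threshold:
--             return True
--         i = j
--     return False
-- ===== Notes on version B (the rewrite author's own statement) =====
-- stated objective: alternative
-- what changed: B decomposes the barcode into maximal runs of equal characters (outer loop over run starts, inner scan to the run end) and compares each whole run length against max(max_homopolymer_length, 1), instead of A's single pass with a reset counter checked after every increment.
import Mathlib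
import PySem

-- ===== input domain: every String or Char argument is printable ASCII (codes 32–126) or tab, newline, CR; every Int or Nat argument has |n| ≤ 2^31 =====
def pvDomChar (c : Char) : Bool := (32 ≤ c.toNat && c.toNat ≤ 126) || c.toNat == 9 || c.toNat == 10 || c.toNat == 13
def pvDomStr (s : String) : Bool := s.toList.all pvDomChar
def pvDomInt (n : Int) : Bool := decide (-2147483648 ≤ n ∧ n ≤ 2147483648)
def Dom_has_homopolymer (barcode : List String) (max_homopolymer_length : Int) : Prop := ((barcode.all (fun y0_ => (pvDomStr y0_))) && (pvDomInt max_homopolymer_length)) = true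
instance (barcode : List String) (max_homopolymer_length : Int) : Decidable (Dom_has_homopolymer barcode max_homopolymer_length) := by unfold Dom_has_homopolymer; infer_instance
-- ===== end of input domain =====

-- B replaces A's reset-counter scan by a run decomposition: an outer loop over maximal runs of
-- equal characters, comparing each run length against max(max_homopolymer_length, 1) (alternative, same cost).


-- ===== PORT A =====
-- A's loop 'for i in range(1, len(barcode))' compares barcode[i] with barcode[i-1];
-- ported as the structural recursion over the tail carrying the previous element and the counter.
def hasHomoLoopA (m : Int) (prev : String) (count : Int) : List String → Bool
  | [] => false
  | x :: xs =>
    if x == prev then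
      if count + 1 > m then true
      else hasHomoLoopA m x (count + 1) xs
    else hasHomoLoopA m x 1 xs

def has_homopolymer (barcode : List String) (max_homopolymer_length : Int) : Bool :=
  match barcode with
  | [] => false
  | p :: rest => hasHomoLoopA max_homopolymer_length p 1 rest

-- ===== PORT B =====
-- B's outer while loop over run starts: the inner 'while' that advances j to the run end is
-- takeWhile/dropWhile; each whole run length is compared to the threshold.
def hasHomoLoopB (threshold : Int) : List String → Bool
  | [] => false
  | x :: xs =>
    if ((1 + (xs.takeWhile (· == x)).length : Int) > threshold) then true
    else hasHomoLoopB threshold (xs.dropWhile (· == x))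
termination_by l => l.length
decreasing_by
  simp only [List.length_cons]
  have := List.length_dropWhile_le (p := (· == x)) (l := xs)
  omega

def has_homopolymer_alt (barcode : List String) (max_homopolymer_length : Int) : Bool :=
  hasHomoLoopB (max max_homopolymer_length 1) barcode

-- ===== PRECONDITION & SPEC =====
def Spec_has_homopolymer (barcode : List String) (max_homopolymer_length : Int) (out : Bool) : Prop := out = has_homopolymer_alt barcode max_homopolymer_length
instance (barcode : List String) (max_homopolymer_length : Int) (out : Bool) : Decidable (Spec_has_homopolymer barcode max_homopolymer_length out) := by unfold Spec_has_homopolymer; infer_instance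

-- ===== CLAIM (what is proved, stated in full; the proofs are below) =====
def Claim_equal_has_homopolymer : Prop := ∀ (barcode : List String) (max_homopolymer_length : Int), Dom_has_homopolymer barcode max_homopolymer_length → Spec_has_homopolymer barcode max_homopolymer_length (has_homopolymer barcode max_homopolymer_length)

-- ===== LEMMAS AND PROOFS =====

theorem loopB_nil (t : Int) : hasHomoLoopB t [] = false := by
  simp [hasHomoLoopB]

theorem loopB_cons (t : Int) (x : String) (xs : List String) :
    hasHomoLoopB t (x :: xs) =
      (decide ((1 + ((xs.takeWhile (· == x)).length : Int)) > t)
        || hasHomoLoopB t (xs.dropWhile (· == x))) := by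
  rw [hasHomoLoopB]
  by_cases h : ((1 + ((xs.takeWhile (· == x)).length : Int)) > t) <;> simp [h]

-- A's "run fires with at least one increment" condition at count = 1 is B's run-length test.
theorem run_head (m : Int) (x : String) (xs : List String) :
    ((decide ((1 + ((xs.takeWhile (· == x)).length : Int)) > m)
        && !(xs.takeWhile (· == x)).isEmpty)
      || hasHomoLoopB (max m 1) (xs.dropWhile (· == x)))
    = hasHomoLoopB (max m 1) (x :: xs) := by
  rw [loopB_cons]
  by_cases he : (xs.takeWhile (· == x)).isEmpty
  · have h0 : (xs.takeWhile (· == x)).length = 0 := by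
      simpa [List.isEmpty_iff, List.length_eq_zero_iff] using he
    have h1 : ¬ ((1 + ((xs.takeWhile (· == x)).length : Int)) > max m 1) := by
      rw [h0]; push_cast; omega
    simp [he, h1]
  · have hlen : 1 ≤ (xs.takeWhile (· == x)).length :=
      List.length_pos_iff.mpr (by simpa [List.isEmpty_iff] using he)
    have hlen' : (1 : Int) ≤ ((xs.takeWhile (· == x)).length : Int) := by exact_mod_cast hlen
    have hd : decide ((1 + ((xs.takeWhile (· == x)).length : Int)) > m)
        = decide ((1 + ((xs.takeWhile (· == x)).length : Int)) > max m 1) := by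
      rw [decide_eq_decide]; omega
    have he' : (xs.takeWhile (· == x)).isEmpty = false := by simpa using he
    rw [hd, he']
    simp

-- Invariant: A's scan from state (prev, count ≥ 1) fires iff the run continuing prev pushes
-- count + runlength over m with at least one increment; otherwise B's run loop takes over.
theorem loopA_eq_runs (m : Int) :
    ∀ (xs : List String) (prev : String) (count : Int), 1 ≤ count →
    hasHomoLoopA m prev count xs =
      ((decide ((count + ((xs.takeWhile (· == prev)).length : Int)) > m)
          && !(xs.takeWhile (· == prev)).isEmpty)
        || hasHomoLoopB (max m 1) (xs.dropWhile (· == prev))) := by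
  intro xs
  induction xs with
  | nil => intro prev count hc; simp [hasHomoLoopA, loopB_nil]
  | cons x xs ih =>
    intro prev count hc
    by_cases hx : x == prev
    · have hxe : x = prev := eq_of_beq hx
      subst hxe
      rw [hasHomoLoopA, if_pos hx]
      rw [List.takeWhile_cons_of_pos (p := fun y => y == x) hx,
        List.dropWhile_cons_of_pos (p := fun y => y == x) hx]
      by_cases h1 : count + 1 > m
      · have h2 : (count + (((x :: xs.takeWhile (· == x)).length : Nat) : Int)) > m := by
          simp only [List.length_cons]; push_cast; omega
        simp only [if_pos h1]
        symm
        simp only [Bool.or_eq_true, Bool.and_eq_true, decide_eq_true_eq, List.length_cons]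
        exact Or.inl ⟨by push_cast; omega, by simp⟩
      · rw [if_neg h1, ih x (count + 1) (by omega)]
        by_cases he : (xs.takeWhile (· == x)).isEmpty
        · have h0 : (xs.takeWhile (· == x)).length = 0 := by
            simpa [List.isEmpty_iff, List.length_eq_zero_iff] using he
          have h3 : ¬ (count + (((x :: xs.takeWhile (· == x)).length : Nat) : Int)) > m := by
            simp only [List.length_cons, h0]; push_cast; omega
          simp [he, h0, h1]
        · have hd : decide ((count + 1 + ((xs.takeWhile (· == x)).length : Int)) > m)
              = decide ((count + (((x :: xs.takeWhile (· == x)).length : Nat) : Int)) > m) := by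
            rw [decide_eq_decide]; simp only [List.length_cons]; push_cast; omega
          have he' : (xs.takeWhile (· == x)).isEmpty = false := by simpa using he
          rw [he', hd]
          simp
    · rw [hasHomoLoopA, if_neg hx]
      rw [List.takeWhile_cons_of_neg (p := fun y => y == prev) hx,
        List.dropWhile_cons_of_neg (p := fun y => y == prev) hx]
      rw [ih x 1 (by omega), run_head]
      simp

-- ===== VERDICT (by name: the statement is the Claim_ definition above) =====
theorem has_homopolymer_spec : Claim_equal_has_homopolymer := by
  intro barcode m _
  unfold Spec_has_homopolymer has_homopolymer has_homopolymer_alt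
  cases barcode with
  | nil => simp [loopB_nil]
  | cons p rest =>
    show hasHomoLoopA m p 1 rest = hasHomoLoopB (max m 1) (p :: rest)
    rw [loopA_eq_runs m rest p 1 (by omega), run_head]
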